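-- pv_equiv track=rewrite | github.com/anthonymedinawork/py-gql | py_gql/lang/utils.py | index_to_loc
-- ===== SOURCE A (Python) =====
-- def index_to_loc(body, position):
--     r""" Get the (lineno, col) tuple from a zero-indexed offset.
--
--     :type body: py_gql.lang.source.Source|str
--     :type index: int
--     :rtype: tuple(int, int)
--
--     >>> index_to_loc("ab\ncd\ne", 0)
--     (1, 1)
--
--     >>> index_to_loc("ab\ncd\ne", 3)
--     (2, 1)
--
--     >>> index_to_loc("", 0)
--     (1, 1)
--
--     >>> index_to_loc("{", 1)
--     (1, 2)
--
--     >>> index_to_loc("", 42)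
--     Traceback (most recent call last):
--         ...
--     IndexError: 42
--     """
--     if not body and not position:
--         return (1, 1)
--
--     if position > len(body):
--         raise IndexError(position)
--
--     lines, cols = 0, 0
--     for offset, char in enumerate(body):
--         if offset == position:
--             return (lines + 1, cols + 1)
--         elif char == '\n':
--             lines += 1
--             cols = 0
--         else:
--             cols += 1
--     return (lines + 1, cols + 1)
-- ===== SOURCE B (Python) =====
-- def index_to_loc(body, position):
--     if position < 0 or position > len(body):
--         raise IndexError(position)
--     lines = body.count('\n', 0, position)
--     return (lines + 1, position - body.rfind('\n', 0, position))
-- ===== Notes on version B (the rewrite author's own statement) =====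
-- stated objective: simpler
-- what changed: Replaces the char-by-char enumerate loop with running line/col counters by two C-level prefix scans - body.count('\n',0,position) and body.rfind('\n',0,position) - plus arithmetic (rfind's -1 sentinel makes the column position+1 when no newline precedes), dropping the empty-body guard which the formula subsumes; B bounds-checks both sides, so Pre_ excludes negative positions.
-- outside the precondition, e.g. on index_to_loc('a', -1): A returns (1, 2), B raises IndexError; on index_to_loc('ab', -1): A returns (1, 3), B raises IndexError
import Mathlib
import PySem

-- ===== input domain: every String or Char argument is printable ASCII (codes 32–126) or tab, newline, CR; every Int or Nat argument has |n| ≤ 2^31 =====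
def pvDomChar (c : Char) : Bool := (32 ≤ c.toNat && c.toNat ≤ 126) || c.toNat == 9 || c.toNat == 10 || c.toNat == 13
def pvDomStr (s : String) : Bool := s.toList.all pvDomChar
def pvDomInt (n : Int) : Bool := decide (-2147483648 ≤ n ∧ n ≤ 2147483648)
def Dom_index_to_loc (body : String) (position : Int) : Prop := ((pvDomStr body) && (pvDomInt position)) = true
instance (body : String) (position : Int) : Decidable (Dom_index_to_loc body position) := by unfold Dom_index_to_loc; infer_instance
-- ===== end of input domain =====

-- B replaces A's char-by-char enumerate loop with two prefix scans (newline count and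
-- last-newline index over body[:position]) plus arithmetic; simpler and loop-free at the
-- Python level. Return values only; B bounds-checks position on both sides.

-- ===== PORT A =====
-- the enumerate loop: state (offset, lines, cols), early return at offset == position
def locLoop (cs : List Char) (offset position lines cols : Int) : Int × Int :=
  match cs with
  | [] => (lines + 1, cols + 1)
  | c :: rest =>
      if offset = position then (lines + 1, cols + 1)
      else if c = '\n' then locLoop rest (offset + 1) position (lines + 1) 0
      else locLoop rest (offset + 1) position lines (cols + 1)

def index_to_loc (body : String) (position : Int) : Int × Int :=
  if body.toList = [] ∧ position = 0 then (1, 1)          -- `not body and not position`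
  else if position > (body.toList.length : Int) then (0, 0) -- raise IndexError(position): excluded by Pre_
  else locLoop body.toList 0 position 0 0

-- ===== PORT B =====
-- body.rfind('\n', 0, position) with start 0: last index of '\n' in the prefix, -1 if absent.
-- Hand port (PySem lacks a lemma-friendly rfind char form): scans from the right, exact.
def rfindNL : List Char → Int
  | [] => -1
  | c :: rest =>
      let r := rfindNL rest
      if r ≠ -1 then r + 1 else if c = '\n' then 0 else -1

def index_to_loc_alt (body : String) (position : Int) : Int × Int :=
  if position < 0 ∨ position > (body.toList.length : Int) then (0, 0) -- raise IndexError(position): excluded by Pre_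
  else
    -- slice body.toList none (some position) is the [0:position] bounds of count/rfind;
    -- count of the one-char substring '\n' is the char count (exact)
    (((PySem.List.slice body.toList none (some position)).count '\n' : Int) + 1,
     position - rfindNL (PySem.List.slice body.toList none (some position)))

-- ===== PRECONDITION & SPEC =====
-- Pre_ excludes position > len(body), where both Pythons raise IndexError, and negative
-- positions, where A's one-sided bounds check falls off the loop and accidentally returns the
-- end-of-body location while B's symmetric bounds check raises IndexError(position).
def Pre_index_to_loc (body : String) (position : Int) : Prop :=
  0 ≤ position ∧ position ≤ (body.toList.length : Int)
instance (body : String) (position : Int) : Decidable (Pre_index_to_loc body position) := by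
  unfold Pre_index_to_loc; infer_instance
def pvWitness_index_to_loc : String × Int := ("ab\ncd", 3)

def Spec_index_to_loc (body : String) (position : Int) (out : Int × Int) : Prop :=
  out = index_to_loc_alt body position
instance (body : String) (position : Int) (out : Int × Int) : Decidable (Spec_index_to_loc body position out) := by
  unfold Spec_index_to_loc; infer_instance

-- ===== CLAIM (what is proved, stated in full; the proofs are below) =====
def Claim_equal_index_to_loc : Prop := ∀ (body : String) (position : Int), Dom_index_to_loc body position → Pre_index_to_loc body position → Spec_index_to_loc body position (index_to_loc body position)

-- ===== LEMMAS AND PROOFS =====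

theorem neg_one_le_rfindNL (l : List Char) : -1 ≤ rfindNL l := by
  induction l with
  | nil => simp [rfindNL]
  | cons c t ih => simp only [rfindNL]; split_ifs <;> omega

theorem rfindNL_eq_neg_one_iff (l : List Char) : rfindNL l = -1 ↔ '\n' ∉ l := by
  induction l with
  | nil => simp [rfindNL]
  | cons c t ih =>
    have ht := neg_one_le_rfindNL t
    simp only [rfindNL, List.mem_cons]
    by_cases hr : rfindNL t = -1
    · rw [if_neg (by omega : ¬ rfindNL t ≠ -1)]
      by_cases hc : c = '\n'
      · simp [hc]
      · have hcn : ¬ ('\n' = c) := fun h => hc h.symm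
        simp [hc, hcn, ih.mp hr]
    · rw [if_pos hr]
      constructor
      · intro h; omega
      · intro h
        exact absurd (by
          by_contra hm
          exact hr (ih.mpr hm)) (fun hmem => h (Or.inr hmem))

theorem locLoop_eq (cs : List Char) (k : Nat) (off lines cols : Int) (hk : k ≤ cs.length) :
    locLoop cs off (off + (k : Int)) lines cols =
      (lines + ((cs.take k).count '\n' : Int) + 1,
       if '\n' ∈ cs.take k then (k : Int) - rfindNL (cs.take k) else cols + (k : Int) + 1) := by
  induction k generalizing cs off lines cols with
  | zero =>
    cases cs <;> simp [locLoop]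
  | succ j ih =>
    match cs with
    | [] => simp at hk
    | c :: t =>
      have hlen : j ≤ t.length := by simpa using hk
      have hoff : ¬ off = off + ((j + 1 : Nat) : Int) := by push_cast; omega
      have h1 : off + ((j + 1 : Nat) : Int) = (off + 1) + (j : Int) := by push_cast; ring
      by_cases hc : c = '\n'
      · subst hc
        simp only [locLoop, if_neg hoff, if_pos rfl]
        rw [h1, ih t (off + 1) (lines + 1) 0 hlen]
        by_cases hm : '\n' ∈ t.take j
        · have hr : rfindNL (t.take j) ≠ -1 := by rw [Ne, rfindNL_eq_neg_one_iff]; simpa using hm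
          simp only [List.take_succ_cons, List.count_cons, List.mem_cons, rfindNL, if_pos hr]
          simp [hm, Prod.ext_iff] <;> omega
        · have hr : rfindNL (t.take j) = -1 := (rfindNL_eq_neg_one_iff _).mpr hm
          simp only [List.take_succ_cons, List.count_cons, List.mem_cons, rfindNL,
            if_neg (by omega : ¬ rfindNL (t.take j) ≠ -1), hr]
          simp [hm, Prod.ext_iff] <;> omega
      · have hcn : ¬ ('\n' = c) := fun h => hc h.symm
        simp only [locLoop, if_neg hoff, if_neg hc]
        rw [h1, ih t (off + 1) lines (cols + 1) hlen]
        by_cases hm : '\n' ∈ t.take j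
        · have hr : rfindNL (t.take j) ≠ -1 := by rw [Ne, rfindNL_eq_neg_one_iff]; simpa using hm
          simp only [List.take_succ_cons, List.count_cons, List.mem_cons, rfindNL, if_pos hr]
          simp [hm, hc, hcn, Prod.ext_iff] <;> omega
        · have hr : rfindNL (t.take j) = -1 := (rfindNL_eq_neg_one_iff _).mpr hm
          simp only [List.take_succ_cons, List.count_cons, List.mem_cons, rfindNL,
            if_neg (by omega : ¬ rfindNL (t.take j) ≠ -1), hr]
          simp [hm, hc, hcn, Prod.ext_iff] <;> omega

-- ===== VERDICT (by name: the statement is the Claim_ definition above) =====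
theorem index_to_loc_spec : Claim_equal_index_to_loc := by
  intro body position _hdom hpre
  obtain ⟨hpos, hle⟩ := hpre
  unfold Spec_index_to_loc
  have hnotgt : ¬ position > (body.toList.length : Int) := by omega
  have hk : position.toNat ≤ body.toList.length := by omega
  have hpt : position = (position.toNat : Int) := by omega
  unfold index_to_loc index_to_loc_alt
  rw [if_neg hnotgt, if_neg (by omega : ¬ (position < 0 ∨ position > (body.toList.length : Int))),
      PySem.List.slice_to _ hpos]
  by_cases hemp : body.toList = [] ∧ position = 0
  · obtain ⟨h1, h2⟩ := hemp
    rw [if_pos ⟨h1, h2⟩]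
    simp [h1, h2, rfindNL]
  · rw [if_neg hemp]
    have h := locLoop_eq body.toList position.toNat 0 0 0 hk
    rw [zero_add, ← hpt] at h
    rw [h]
    by_cases hm : '\n' ∈ body.toList.take position.toNat
    · simp [hm]
    · have hr : rfindNL (body.toList.take position.toNat) = -1 :=
        (rfindNL_eq_neg_one_iff _).mpr hm
      simp [hm, hr] <;> omega
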